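-- pv_equiv track=rewrite | github.com/MatejAdamek/Engeto-project1-text-analyzer | projekt1.py | text_control
-- ===== SOURCE A (Python) =====
-- def text_control(text):
--     words = text.split()
--     words = [word.strip('.,!?"\'') for word in words]
--
--     word_count = len(words)
--     titlecase_count = sum(1 for word in words if word.istitle())
--     uppercase_count = sum(1 for word in words if word.isupper() and word.isalpha())
--     lowercase_count = sum(1 for word in words if word.islower())
--     numeric_count = sum(1 for word in words if word.isnumeric())
--     sum_of_numbers = sum(int(word) for word in words if word.isnumeric())
--
--     word_lengths = {}
--
--     for word in words:
--         length = len(word)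
--         if length in word_lengths:
--             word_lengths[length] += 1
--         else:
--             word_lengths[length] = 1
--
--     return word_count, titlecase_count, uppercase_count, lowercase_count, numeric_count, sum_of_numbers, word_lengths
-- ===== SOURCE B (Python) =====
-- def text_control(text):
--     # Build a frequency index (a Counter) of the stripped words in one pass,
--     # then compute every statistic over the DISTINCT words only, weighted by
--     # multiplicity; correct because all seven aggregates are additive over
--     # occurrences and dict order preserves first-occurrence order.
--     freq = {}
--     for raw in text.split():
--         word = raw.strip('.,!?"\'')
--         freq[word] = freq.get(word, 0) + 1
--
--     word_count = 0
--     titlecase_count = 0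
--     uppercase_count = 0
--     lowercase_count = 0
--     numeric_count = 0
--     sum_of_numbers = 0
--     word_lengths = {}
--     for word, mult in freq.items():
--         word_count += mult
--         if word.istitle():
--             titlecase_count += mult
--         if word.isupper() and word.isalpha():
--             uppercase_count += mult
--         if word.islower():
--             lowercase_count += mult
--         if word.isnumeric():
--             numeric_count += mult
--             sum_of_numbers += mult * int(word)
--         length = len(word)
--         word_lengths[length] = word_lengths.get(length, 0) + mult
--
--     return word_count, titlecase_count, uppercase_count, lowercase_count, numeric_count, sum_of_numbers, word_lengths
-- ===== Notes on version B (the rewrite author's own statement) =====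
-- stated objective: alternative
-- what changed: A makes seven independent passes over the full word list; B instead builds a frequency index (a counter keyed by the stripped word) in one pass and then computes every statistic over the distinct words only, weighting each contribution by its multiplicity, so each predicate and int() conversion runs once per distinct word instead of once per occurrence.
import Mathlib
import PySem

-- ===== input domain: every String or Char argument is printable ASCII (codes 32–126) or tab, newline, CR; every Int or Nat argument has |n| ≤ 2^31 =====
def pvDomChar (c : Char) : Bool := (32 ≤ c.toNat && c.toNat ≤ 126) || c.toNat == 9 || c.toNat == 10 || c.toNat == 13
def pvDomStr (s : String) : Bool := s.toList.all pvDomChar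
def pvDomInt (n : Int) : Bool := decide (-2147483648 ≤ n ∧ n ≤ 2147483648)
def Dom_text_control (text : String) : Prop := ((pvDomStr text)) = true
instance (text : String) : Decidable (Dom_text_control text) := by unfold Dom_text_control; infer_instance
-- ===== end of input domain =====

-- B builds a frequency index (a counter keyed by the stripped word) in one pass and then computes
-- every statistic over the DISTINCT words only, weighted by multiplicity (objective: alternative).

-- ===== PORT A =====
-- shared Python-builtin predicates (exact on the printable-ASCII domain, where cased = ASCII letter)
def pvIstitle (w : String) : Bool :=
  let r := w.toList.foldl (fun (st : Bool × Bool × Bool) c =>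
    let (ok, found, prev) := st
    if PySem.Chars.isupper c then (ok && !prev, true, true)
    else if PySem.Chars.islower c then (ok && prev, true, true)
    else (ok, found, false)) (true, false, false)
  r.1 && r.2.1
def pvIsupper (w : String) : Bool :=
  w.toList.any PySem.Chars.isalpha && w.toList.all (fun c => !PySem.Chars.islower c)
def pvIslower (w : String) : Bool :=
  w.toList.any PySem.Chars.isalpha && w.toList.all (fun c => !PySem.Chars.isupper c)
def pvIsnumeric (w : String) : Bool :=
  !w.toList.isEmpty && w.toList.all PySem.Chars.isdigit
-- int(w); exact here because both programs call it only under isnumeric(), where int() succeeds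
def pvInt (w : String) : Int := (PySem.Int.ofStr? w).getD 0
def pvWords (text : String) : List String :=
  (PySem.Str.split₀ text).map (fun w => PySem.Str.stripChars w ".,!?\"'")

def text_control (text : String) : Int × Int × Int × Int × Int × Int × (List (Int × Int)) :=
  let words := pvWords text
  let word_count : Int := words.length
  let titlecase_count : Int := (words.filter pvIstitle).length
  let uppercase_count : Int := (words.filter (fun w => pvIsupper w && PySem.Str.strIsalpha w)).length
  let lowercase_count : Int := (words.filter pvIslower).length
  let numeric_count : Int := (words.filter pvIsnumeric).length
  let sum_of_numbers : Int := ((words.filter pvIsnumeric).map pvInt).sum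
  let word_lengths : PySem.Dict Int Int := words.foldl (fun d w =>
      let length : Int := (w.toList.length : Int)
      if d.contains length then d.insert length (d.getD length 0 + 1)
      else d.insert length 1) PySem.Dict.empty
  (word_count, titlecase_count, uppercase_count, lowercase_count, numeric_count,
    sum_of_numbers, word_lengths.items)

-- ===== PORT B =====
-- first loop of Source B: the frequency index of the stripped words
def pvFreq (text : String) : PySem.Dict String Int :=
  (PySem.Str.split₀ text).foldl (fun d raw =>
    let word := PySem.Str.stripChars raw ".,!?\"'"
    d.insert word (d.getD word 0 + 1)) PySem.Dict.empty

-- second loop of Source B: one step per DISTINCT word with its multiplicity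
def pvStepB (st : Int × Int × Int × Int × Int × Int × PySem.Dict Int Int) (p : String × Int) :
    Int × Int × Int × Int × Int × Int × PySem.Dict Int Int :=
  let (wc, tc, uc, lc, nc, tot, d) := st
  let (w, m) := p
  let wc := wc + m
  let tc := if pvIstitle w then tc + m else tc
  let uc := if pvIsupper w && PySem.Str.strIsalpha w then uc + m else uc
  let lc := if pvIslower w then lc + m else lc
  let (nc, tot) := if pvIsnumeric w then (nc + m, tot + m * pvInt w) else (nc, tot)
  let length : Int := (w.toList.length : Int)
  (wc, tc, uc, lc, nc, tot, d.insert length (d.getD length 0 + m))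

def text_control_alt (text : String) : Int × Int × Int × Int × Int × Int × (List (Int × Int)) :=
  let r := (pvFreq text).items.foldl pvStepB (0, 0, 0, 0, 0, 0, PySem.Dict.empty)
  (r.1, r.2.1, r.2.2.1, r.2.2.2.1, r.2.2.2.2.1, r.2.2.2.2.2.1, r.2.2.2.2.2.2.items)

-- ===== PRECONDITION & SPEC =====
def Spec_text_control (text : String) (out : Int × Int × Int × Int × Int × Int × (List (Int × Int))) : Prop := out = text_control_alt text
instance (text : String) (out : Int × Int × Int × Int × Int × Int × (List (Int × Int))) : Decidable (Spec_text_control text out) := by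
  unfold Spec_text_control
  -- built stepwise: instance search hits its depth limit on the 7-component product
  have h1 : DecidableEq (List (Int × Int)) := inferInstance
  have h2 : DecidableEq (Int × List (Int × Int)) := @instDecidableEqProd _ _ _ h1
  have h3 : DecidableEq (Int × Int × List (Int × Int)) := @instDecidableEqProd _ _ _ h2
  have h4 : DecidableEq (Int × Int × Int × List (Int × Int)) := @instDecidableEqProd _ _ _ h3
  have h5 : DecidableEq (Int × Int × Int × Int × List (Int × Int)) := @instDecidableEqProd _ _ _ h4
  have h6 : DecidableEq (Int × Int × Int × Int × Int × List (Int × Int)) := @instDecidableEqProd _ _ _ h5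
  exact @instDecidableEqProd _ _ _ h6 out (text_control_alt text)

-- ===== CLAIM (what is proved, stated in full; the proofs are below) =====
def Claim_equal_text_control : Prop := ∀ (text : String), Dom_text_control text → Spec_text_control text (text_control text)

-- ===== LEMMAS AND PROOFS =====

-- summing g over a filtered list = summing the guarded g over the whole list
lemma sum_map_filter_ite {α : Type} (l : List α) (p : α → Bool) (g : α → Int) :
    ((l.filter p).map g).sum = (l.map (fun x => if p x then g x else 0)).sum := by
  induction l with
  | nil => rfl
  | cons x l ih => by_cases h : p x = true <;> simp [h, ih]

-- on a Nodup list containing x, the sum of 'g at x, else 0' is g x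
lemma sum_map_ite_single {α : Type} [DecidableEq α] (x : α) (g : α → Int) :
    ∀ l : List α, l.Nodup → x ∈ l →
      (l.map (fun w => if w = x then g w else 0)).sum = g x := by
  intro l
  induction l with
  | nil => intro _ hx; cases hx
  | cons y l ih =>
    intro hl hx
    rcases List.mem_cons.mp hx with h | h
    · subst h
      have hz : (l.map (fun w => if w = x then g w else 0)).sum = 0 := by
        apply List.sum_eq_zero
        intro z hz
        rcases List.mem_map.mp hz with ⟨w, hw, rfl⟩
        have : w ≠ x := fun e => (List.nodup_cons.mp hl).1 (e ▸ hw)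
        simp [this]
      simp [hz]
    · have hy : y ≠ x := fun e => (List.nodup_cons.mp hl).1 (e ▸ h)
      simp [hy, ih (List.nodup_cons.mp hl).2 h]

-- the grouped sum over distinct words, weighted by multiplicity, equals the plain sum
lemma groupedSum {α : Type} [DecidableEq α] (ws : List α) (f : α → Int) :
    ((PySem.Set.ofList ws).map (fun w => (ws.count w : Int) * f w)).sum = (ws.map f).sum := by
  induction ws using List.reverseRecOn with
  | nil => rfl
  | append_singleton ws x ih =>
    by_cases hx : x ∈ ws
    · rw [PySem.Set.ofList_append_singleton, PySem.Set.add_of_mem (by simpa [PySem.Set.mem_ofList] using hx)]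
      have hrw : ∀ w : α, ((ws ++ [x]).count w : Int) * f w
          = (ws.count w : Int) * f w + (if w = x then f w else 0) := by
        intro w
        by_cases h : w = x
        · subst h; simp [List.count_append]; ring
        · simp [List.count_append, List.count_cons]
          rw [if_neg (fun e : x = w => h e.symm), if_neg h]
          ring
      calc ((PySem.Set.ofList ws).map (fun w => ((ws ++ [x]).count w : Int) * f w)).sum
          = ((PySem.Set.ofList ws).map (fun w => (ws.count w : Int) * f w)).sum
            + ((PySem.Set.ofList ws).map (fun w => if w = x then f w else 0)).sum := by
            rw [← PySem.List.sum_map_add_int]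
            exact congrArg List.sum (List.map_congr_left (fun w _ => hrw w))
        _ = (ws.map f).sum + f x := by
            rw [ih, sum_map_ite_single x f _ (PySem.Set.nodup_ofList ws)
              (by simpa [PySem.Set.mem_ofList] using hx)]
        _ = ((ws ++ [x]).map f).sum := by simp
    · rw [PySem.Set.ofList_append_singleton, PySem.Set.add_of_not_mem (by simpa [PySem.Set.mem_ofList] using hx)]
      have hwsc : ∀ w ∈ PySem.Set.ofList ws, ((ws ++ [x]).count w : Int) * f w
          = (ws.count w : Int) * f w := by
        intro w hw
        have hmem : w ∈ ws := by simpa [PySem.Set.mem_ofList] using hw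
        have : w ≠ x := fun e => hx (e ▸ hmem)
        simp [List.count_append, List.count_cons]
        exact Or.inl (fun e : x = w => this e.symm)
      have h0 : ws.count x = 0 := List.count_eq_zero.mpr hx
      rw [List.map_append, List.sum_append, List.map_congr_left hwsc, ih]
      simp [List.count_append, h0]

-- dedup of a mapped dedup is dedup of the map (lengths of distinct words, first-occurrence order)
lemma ofList_map_ofList {α β : Type} [DecidableEq α] [DecidableEq β] (xs : List α) (f : α → β) :
    PySem.Set.ofList ((PySem.Set.ofList xs).map f) = PySem.Set.ofList (xs.map f) := by
  induction xs using List.reverseRecOn with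
  | nil => rfl
  | append_singleton xs x ih =>
    rw [List.map_append, List.map_cons, List.map_nil, PySem.Set.ofList_append_singleton (xs.map f) (f x)]
    rw [PySem.Set.ofList_append_singleton xs x]
    by_cases hx : x ∈ xs
    · rw [PySem.Set.add_of_mem (by simpa [PySem.Set.mem_ofList] using hx), ih]
      rw [PySem.Set.add_of_mem (by simpa [PySem.Set.mem_ofList] using List.mem_map_of_mem (f := f) hx)]
    · rw [PySem.Set.add_of_not_mem (by simpa [PySem.Set.mem_ofList] using hx)]
      rw [List.map_append, List.map_cons, List.map_nil,
        PySem.Set.ofList_append_singleton ((PySem.Set.ofList xs).map f) (f x), ih]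

-- value of the grouped length-counter fold at any key
lemma getD_foldl_insert_key_add {α : Type} (ps : List (α × Int)) (k : α × Int → Int)
    (d : PySem.Dict Int Int) (c : Int) :
    (ps.foldl (fun d p => d.insert (k p) (d.getD (k p) 0 + p.2)) d).getD c 0
      = d.getD c 0 + ((ps.filter (fun p => k p == c)).map (·.2)).sum := by
  induction ps using List.reverseRecOn generalizing d with
  | nil => simp
  | append_singleton ps p ih =>
    rw [List.foldl_append, List.foldl_cons, List.foldl_nil, List.filter_append]
    by_cases h : c = k p
    · subst h
      simp [ih, add_assoc]
    · have h2 : ¬ (k p = c) := fun e => h e.symm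
      simp [PySem.Dict.getD_insert, h, h2, ih]

-- A's conditional dict step equals the unconditional insert step
lemma dict_step_eq (d : PySem.Dict Int Int) (l : Int) :
    (if d.contains l then d.insert l (d.getD l 0 + 1) else d.insert l 1) =
      d.insert l (d.getD l 0 + 1) := by
  by_cases h : d.contains l = true
  · simp [h]
  · simp only [Bool.not_eq_true] at h
    rw [if_neg (by simp [h]), PySem.Dict.getD_of_not_contains (h := h), zero_add]

-- B's second fold computes all seven aggregates over any pair list
lemma foldB_spec (ps : List (String × Int)) (wc tc uc lc nc tot : Int) (d : PySem.Dict Int Int) :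
    ps.foldl pvStepB (wc, tc, uc, lc, nc, tot, d) =
      (wc + (ps.map (·.2)).sum,
       tc + (ps.map (fun p => if pvIstitle p.1 then p.2 else 0)).sum,
       uc + (ps.map (fun p => if pvIsupper p.1 && PySem.Str.strIsalpha p.1 then p.2 else 0)).sum,
       lc + (ps.map (fun p => if pvIslower p.1 then p.2 else 0)).sum,
       nc + (ps.map (fun p => if pvIsnumeric p.1 then p.2 else 0)).sum,
       tot + (ps.map (fun p => if pvIsnumeric p.1 then p.2 * pvInt p.1 else 0)).sum,
       ps.foldl (fun d p => d.insert ((p.1.toList.length : Int))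
         (d.getD ((p.1.toList.length : Int)) 0 + p.2)) d) := by
  induction ps generalizing wc tc uc lc nc tot d with
  | nil => simp
  | cons p ps ih =>
    simp only [List.foldl_cons, pvStepB, List.map_cons, List.sum_cons]
    rw [ih]
    split_ifs <;>
      simp only [Prod.mk.injEq, and_true] <;> and_intros <;> ring

-- grouped total: summing multiplicities over the distinct words gives the word count
lemma grouped_total (ws : List String) :
    ((PySem.Set.ofList ws).map (fun w => (ws.count w : Int))).sum = (ws.length : Int) := by
  have h := groupedSum ws (fun _ => (1 : Int))
  simp only [mul_one] at h
  simpa using h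

-- grouped conditional count: adding the multiplicity under a predicate gives the filtered length
lemma grouped_count_pred (ws : List String) (p : String → Bool) :
    ((PySem.Set.ofList ws).map (fun w => if p w then (ws.count w : Int) else 0)).sum
      = ((ws.filter p).length : Int) := by
  have he : (fun w => if p w then (ws.count w : Int) else 0)
      = (fun w => (ws.count w : Int) * (if p w then (1 : Int) else 0)) := by
    funext w; by_cases h : p w <;> simp [h]
  rw [he, groupedSum, PySem.List.sum_map_ite_one_zero, List.countP_eq_length_filter]

-- grouped conditional weighted sum: adding multiplicity × value under a predicate
lemma grouped_sum_pred (ws : List String) (p : String → Bool) (g : String → Int) :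
    ((PySem.Set.ofList ws).map (fun w => if p w then (ws.count w : Int) * g w else 0)).sum
      = ((ws.filter p).map g).sum := by
  have he : (fun w => if p w then (ws.count w : Int) * g w else 0)
      = (fun w => (ws.count w : Int) * (if p w then g w else 0)) := by
    funext w; by_cases h : p w <;> simp [h]
  rw [he, groupedSum, ← sum_map_filter_ite]

-- grouped length count: multiplicities of distinct words of a given length sum to that length's count
lemma grouped_len_count (ws : List String) (c : Int) :
    (((PySem.Set.ofList ws).filter (fun w => ((w.toList.length : Int)) == c)).map
        (fun w => (ws.count w : Int))).sum
      = ((ws.map (fun w => (w.toList.length : Int))).count c : Int) := by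
  rw [sum_map_filter_ite]
  have he : (fun w => if ((w.toList.length : Int)) == c then (ws.count w : Int) else 0)
      = (fun w => (ws.count w : Int) * (if (fun w => ((w.toList.length : Int)) == c) w then (1 : Int) else 0)) := by
    funext w
    by_cases h : (((w.toList.length : Int)) == c) = true
    · rw [if_pos h, if_pos h, mul_one]
    · rw [if_neg h, if_neg h, mul_zero]
  rw [he, groupedSum, PySem.List.sum_map_ite_one_zero]
  congr 1
  simp [List.count, List.countP_map, Function.comp_def]

-- B's grouped length-counter dict has the same items as A's counter of the lengths
lemma itemsB_eq (ws : List String) :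
    (((PySem.Set.ofList ws).map (fun w => (w, (ws.count w : Int)))).foldl
        (fun d p => d.insert ((p.1.toList.length : Int)) (d.getD ((p.1.toList.length : Int)) 0 + p.2))
        PySem.Dict.empty).items
      = (PySem.Dict.counter (ws.map (fun w => (w.toList.length : Int)))).items := by
  have hnodup : (((PySem.Set.ofList ws).map (fun w => (w, (ws.count w : Int)))).foldl
      (fun d p => d.insert ((p.1.toList.length : Int)) (d.getD ((p.1.toList.length : Int)) 0 + p.2))
      PySem.Dict.empty).keys.Nodup := by
    exact PySem.Dict.nodup_keys_foldl_insert_key _ _ _ _ (by simp [PySem.Dict.keys_empty])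
  rw [PySem.Dict.items_eq_map_keys _ hnodup 0, PySem.Dict.items_counter]
  have hkeys : (((PySem.Set.ofList ws).map (fun w => (w, (ws.count w : Int)))).foldl
      (fun d p => d.insert ((p.1.toList.length : Int)) (d.getD ((p.1.toList.length : Int)) 0 + p.2))
      PySem.Dict.empty).keys = PySem.Set.ofList (ws.map (fun w => (w.toList.length : Int))) := by
    rw [PySem.Dict.keys_foldl_insert_key]
    rw [PySem.Dict.keys_empty, PySem.Set.update_nil_left, List.map_map]
    have : ((fun p : String × Int => ((p.1.toList.length : Int))) ∘ (fun w => (w, (ws.count w : Int))))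
        = (fun w => ((w.toList.length : Int))) := rfl
    rw [this, ofList_map_ofList]
  rw [hkeys]
  apply List.map_congr_left
  intro k _
  simp only [Prod.mk.injEq, true_and]
  have hval := getD_foldl_insert_key_add ((PySem.Set.ofList ws).map (fun w => (w, (ws.count w : Int))))
    (fun p => ((p.1.toList.length : Int))) PySem.Dict.empty k
  rw [hval, PySem.Dict.getD_empty, zero_add]
  rw [List.filter_map, List.map_map]
  have hc : ((fun p : String × Int => ((p.1.toList.length : Int)) == k) ∘ (fun w => (w, (ws.count w : Int))))
      = (fun w => ((w.toList.length : Int)) == k) := rfl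
  have hv : ((fun p : String × Int => p.2) ∘ (fun w => (w, (ws.count w : Int))))
      = (fun w => (ws.count w : Int)) := rfl
  rw [hc, hv, grouped_len_count]

-- A's hand-written dict loop is the counter of the word lengths
lemma dictA_eq_counter (ws : List String) :
    ws.foldl (fun d w =>
        let length : Int := (w.toList.length : Int)
        if d.contains length then d.insert length (d.getD length 0 + 1)
        else d.insert length 1) PySem.Dict.empty
      = PySem.Dict.counter (ws.map (fun w => (w.toList.length : Int))) := by
  have h : ∀ (l : List String) (d : PySem.Dict Int Int),
      l.foldl (fun d w =>
        let length : Int := (w.toList.length : Int)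
        if d.contains length then d.insert length (d.getD length 0 + 1)
        else d.insert length 1) d
      = l.foldl (fun d w => d.insert ((w.toList.length : Int)) (d.getD ((w.toList.length : Int)) 0 + 1)) d := by
    intro l
    induction l with
    | nil => intro d; rfl
    | cons w l ih =>
      intro d
      simp only [List.foldl_cons]
      rw [dict_step_eq, ih]
  rw [h, ← PySem.Dict.foldl_insert_getD_add_one_eq_counter, List.foldl_map]

-- ===== VERDICT (by name: the statement is the Claim_ definition above) =====
theorem text_control_spec : Claim_equal_text_control := by
  intro text _
  show text_control text = text_control_alt text
  have hfreq : pvFreq text = PySem.Dict.counter (pvWords text) := by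
    unfold pvFreq pvWords
    rw [← PySem.Dict.foldl_insert_getD_add_one_eq_counter, List.foldl_map]
  unfold text_control text_control_alt
  rw [hfreq, PySem.Dict.items_counter, foldB_spec]
  set ws := pvWords text
  simp only [List.map_map, Function.comp_def, zero_add, Prod.mk.injEq]
  refine ⟨?_, ?_, ?_, ?_, ?_, ?_, ?_⟩
  · exact (grouped_total ws).symm
  · exact (grouped_count_pred ws pvIstitle).symm
  · exact (grouped_count_pred ws (fun w => pvIsupper w && PySem.Str.strIsalpha w)).symm
  · exact (grouped_count_pred ws pvIslower).symm
  · exact (grouped_count_pred ws pvIsnumeric).symm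
  · rw [← grouped_sum_pred ws pvIsnumeric pvInt]
  · rw [dictA_eq_counter]
    exact (itemsB_eq ws).symm
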